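-- pv_equiv track=rewrite | github.com/NikkiMarchant/CMIS102 | CMIS 102/week_6_Assignment.py | chara_dig
-- ===== SOURCE A (Python) =====
-- def chara_dig(password):
--     # chara_dig checks if the password contains an alpha and a digit
--     alpha = False
--     digit = False
--     for character in password:
--         if character.isalpha():
--             alpha = True
--         if character.isdigit():
--             digit = True
--     if alpha and digit:
--         return True  # return True if password contains an alpha and a digit
--     return False
-- ===== SOURCE B (Python) =====
-- def chara_dig(password):
--     # state machine over a shared iterator: find the first alpha-or-digit
--     # character, then scan only the remainder for the other class
--     it = iter(password)
--     for c in it: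
--         if c.isalpha():
--             return any(ch.isdigit() for ch in it)
--         if c.isdigit():
--             return any(ch.isalpha() for ch in it)
--     return False
-- ===== Notes on version B (the rewrite author's own statement) =====
-- stated objective: alternative
-- what changed: Replaces the two-flag full pass with a mode-switching state machine on a shared iterator: scan to the first alpha-or-digit character, then scan only the rest of the string for the other class, returning early.
import Mathlib
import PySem

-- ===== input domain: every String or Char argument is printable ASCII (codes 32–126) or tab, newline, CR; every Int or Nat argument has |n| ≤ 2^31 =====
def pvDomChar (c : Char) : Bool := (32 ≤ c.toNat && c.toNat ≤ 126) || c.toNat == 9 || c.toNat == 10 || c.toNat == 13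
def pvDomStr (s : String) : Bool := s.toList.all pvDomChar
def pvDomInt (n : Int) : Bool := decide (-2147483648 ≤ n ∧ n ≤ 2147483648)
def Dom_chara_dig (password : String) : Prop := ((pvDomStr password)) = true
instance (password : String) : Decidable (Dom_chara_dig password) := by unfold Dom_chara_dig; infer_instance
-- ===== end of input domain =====

-- B replaces A's two-flag full pass with a mode-switching state machine: scan to the
-- first alpha-or-digit character, then scan only the remainder for the other class.

-- ===== PORT A =====
def chara_dig (password : String) : Bool :=
  let st := password.toList.foldl
    (fun (s : Bool × Bool) character =>
      let s := if PySem.Chars.isalpha character then (true, s.2) else s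
      if PySem.Chars.isdigit character then (s.1, true) else s)
    (false, false)
  if st.1 && st.2 then true else false

-- ===== PORT B =====
def chara_dig_alt_go : List Char → Bool
  | [] => false
  | c :: rest =>
    if PySem.Chars.isalpha c then rest.any (fun ch => PySem.Chars.isdigit ch)
    else if PySem.Chars.isdigit c then rest.any (fun ch => PySem.Chars.isalpha ch)
    else chara_dig_alt_go rest

def chara_dig_alt (password : String) : Bool :=
  chara_dig_alt_go password.toList

-- ===== PRECONDITION & SPEC =====
def Spec_chara_dig (password : String) (out : Bool) : Prop := out = chara_dig_alt password
instance (password : String) (out : Bool) : Decidable (Spec_chara_dig password out) := by unfold Spec_chara_dig; infer_instance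

-- ===== CLAIM (what is proved, stated in full; the proofs are below) =====
def Claim_equal_chara_dig : Prop := ∀ (password : String), Dom_chara_dig password → Spec_chara_dig password (chara_dig password)

-- ===== LEMMAS AND PROOFS =====
theorem chara_dig_foldl (l : List Char) (a d : Bool) :
    l.foldl
      (fun (s : Bool × Bool) character =>
        let s := if PySem.Chars.isalpha character then (true, s.2) else s
        if PySem.Chars.isdigit character then (s.1, true) else s)
      (a, d)
    = (a || l.any (fun c => PySem.Chars.isalpha c),
       d || l.any (fun c => PySem.Chars.isdigit c)) := by
  induction l generalizing a d with
  | nil => simp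
  | cons c t ih =>
    simp only [List.foldl_cons, List.any_cons]
    by_cases hα : PySem.Chars.isalpha c <;> by_cases hδ : PySem.Chars.isdigit c <;>
      simp [hα, hδ, ih]

theorem alpha_not_digit (c : Char) (h : PySem.Chars.isalpha c = true) :
    PySem.Chars.isdigit c = false := by
  simp only [PySem.Chars.isalpha, PySem.Chars.isupper, PySem.Chars.islower,
    PySem.Chars.isdigit, Bool.or_eq_true, Bool.and_eq_true, decide_eq_true_eq,
    Bool.and_eq_false_iff, decide_eq_false_iff_not, Char.le_def,
    UInt32.le_iff_toNat_le] at *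
  simp only [show ('0' : Char).val.toNat = 48 from rfl, show ('9' : Char).val.toNat = 57 from rfl,
    show ('A' : Char).val.toNat = 65 from rfl, show ('Z' : Char).val.toNat = 90 from rfl,
    show ('a' : Char).val.toNat = 97 from rfl, show ('z' : Char).val.toNat = 122 from rfl] at *
  omega

theorem chara_dig_alt_go_eq (l : List Char) :
    chara_dig_alt_go l
      = (l.any (fun c => PySem.Chars.isalpha c) && l.any (fun c => PySem.Chars.isdigit c)) := by
  induction l with
  | nil => simp [chara_dig_alt_go]
  | cons c t ih =>
    by_cases hα : PySem.Chars.isalpha c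
    · simp [chara_dig_alt_go, hα, alpha_not_digit c hα]
    · by_cases hδ : PySem.Chars.isdigit c <;> simp [chara_dig_alt_go, hα, hδ, ih]

-- ===== VERDICT (by name: the statement is the Claim_ definition above) =====
theorem chara_dig_spec : Claim_equal_chara_dig := by
  intro password _
  unfold Spec_chara_dig chara_dig chara_dig_alt
  rw [chara_dig_foldl, chara_dig_alt_go_eq]
  simp only [Bool.false_or]
  by_cases h1 : password.toList.any (fun c => PySem.Chars.isalpha c) <;>
    by_cases h2 : password.toList.any (fun c => PySem.Chars.isdigit c) <;>
      simp [h1, h2]
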